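-- pv_equiv track=rewrite | github.com/TorstenSandell/Advent-of-Code | 2025/6/pt2_short.py | convert_to_int_and_split_around_empty
-- ===== SOURCE A (Python) =====
-- from typing import List
--
-- def convert_to_int_and_split_around_empty(numbers_list: List[str]):
--     number_split_list = [[]]
--     for number in numbers_list:
--         n = number.strip()
--         if n == "":
--             number_split_list.append([])
--             continue
--         number_split_list[-1].append(int(number))
--     return number_split_list
-- ===== SOURCE B (Python) =====
-- def convert_to_int_and_split_around_empty(numbers_list):
--     if not numbers_list:
--         return [[]]
--     head = numbers_list[0]
--     tail = convert_to_int_and_split_around_empty(numbers_list[1:])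
--     if head.strip() == "":
--         return [[]] + tail
--     tail[0] = [int(head)] + tail[0]
--     return tail
-- ===== Notes on version B (the rewrite author's own statement) =====
-- stated objective: alternative
-- what changed: Replaces A's forward loop that appends into the last group of a growing accumulator with a structural recursion that builds the groups back-to-front, prepending each parsed int to the first group of the recursive result.
import Mathlib
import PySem

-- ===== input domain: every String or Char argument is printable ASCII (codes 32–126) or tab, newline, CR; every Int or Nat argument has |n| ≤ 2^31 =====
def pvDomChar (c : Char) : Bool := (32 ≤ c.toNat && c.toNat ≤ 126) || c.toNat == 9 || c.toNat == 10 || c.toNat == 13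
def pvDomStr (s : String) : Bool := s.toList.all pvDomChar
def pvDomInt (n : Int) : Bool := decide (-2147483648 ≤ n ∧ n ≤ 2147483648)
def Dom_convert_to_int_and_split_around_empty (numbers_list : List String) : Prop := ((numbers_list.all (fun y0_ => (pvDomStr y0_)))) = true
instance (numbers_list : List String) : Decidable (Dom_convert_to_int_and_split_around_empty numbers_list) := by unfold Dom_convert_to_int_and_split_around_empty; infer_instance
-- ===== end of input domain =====

-- B rebuilds the groups by structural recursion back-to-front (prepend to the first group
-- of the recursive result) instead of A's forward loop appending into the accumulator's last group.


-- shared helper: int(number); Pre_ guarantees isSome on every parsed entry, so getD 0 is never used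
def pvParse (s : String) : Int := (PySem.Int.ofStr? s).getD 0

-- ===== PORT A =====
-- Python A's loop state is the whole list of groups; 'number_split_list[-1].append(...)'
-- is modelled exactly as dropLast ++ [last ++ [v]].
def pvStepA (st : List (List Int)) (number : String) : List (List Int) :=
  if PySem.Str.strip number = "" then st ++ [[]]
  else st.dropLast ++ [st.getLast! ++ [pvParse number]]

def convert_to_int_and_split_around_empty (numbers_list : List String) : List (List Int) :=
  numbers_list.foldl pvStepA [[]]

-- ===== PORT B =====
def convert_to_int_and_split_around_empty_alt (numbers_list : List String) : List (List Int) :=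
  match numbers_list with
  | [] => [[]]
  | head :: rest =>
    let tail := convert_to_int_and_split_around_empty_alt rest
    if PySem.Str.strip head = "" then [] :: tail
    else match tail with
         | g :: gs => (pvParse head :: g) :: gs
         | [] => [[pvParse head]]   -- unreachable: tail is always nonempty

-- ===== PRECONDITION & SPEC =====
-- Pre_ excludes exactly the inputs where Python's int() raises ValueError: every entry that is
-- not blank after strip must parse as an int.
def Pre_convert_to_int_and_split_around_empty (numbers_list : List String) : Prop :=
  ∀ s ∈ numbers_list, PySem.Str.strip s = "" ∨ (PySem.Int.ofStr? s).isSome = true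
instance (numbers_list : List String) : Decidable (Pre_convert_to_int_and_split_around_empty numbers_list) := by unfold Pre_convert_to_int_and_split_around_empty; infer_instance

def pvWitness_convert_to_int_and_split_around_empty : List String := [" 7 ", "", "+5", "  ", "-12"]

def Spec_convert_to_int_and_split_around_empty (numbers_list : List String) (out : List (List Int)) : Prop := out = convert_to_int_and_split_around_empty_alt numbers_list
instance (numbers_list : List String) (out : List (List Int)) : Decidable (Spec_convert_to_int_and_split_around_empty numbers_list out) := by unfold Spec_convert_to_int_and_split_around_empty; infer_instance

-- ===== CLAIM (what is proved, stated in full; the proofs are below) =====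
def Claim_equal_convert_to_int_and_split_around_empty : Prop := ∀ (numbers_list : List String), Dom_convert_to_int_and_split_around_empty numbers_list → Pre_convert_to_int_and_split_around_empty numbers_list → Spec_convert_to_int_and_split_around_empty numbers_list (convert_to_int_and_split_around_empty numbers_list)

-- ===== LEMMAS AND PROOFS =====

theorem alt_ne_nil (xs : List String) : convert_to_int_and_split_around_empty_alt xs ≠ [] := by
  cases xs with
  | nil => simp [convert_to_int_and_split_around_empty_alt]
  | cons h t =>
    simp only [convert_to_int_and_split_around_empty_alt]
    split
    · simp
    · split <;> simp

-- prepend g to the first group of a (nonempty) group list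
def pvConsFirst (g : List Int) : List (List Int) → List (List Int)
  | [] => [g]
  | h :: t => (g ++ h) :: t

theorem pv_dropLast_getLast_cons (st : List (List Int)) (h : st ≠ []) (t : List (List Int)) :
    st.dropLast ++ st.getLast! :: t = st ++ t := by
  have h1 : st.getLast! = st.getLast h := by
    rw [List.getLast!_eq_getLast?_getD, List.getLast?_eq_some_getLast h]; rfl
  have h2 := List.dropLast_concat_getLast h
  calc st.dropLast ++ st.getLast! :: t = (st.dropLast ++ [st.getLast h]) ++ t := by
        rw [h1]; simp
    _ = st ++ t := by rw [h2]

theorem foldl_stepA (xs : List String) : ∀ (st : List (List Int)), st ≠ [] →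
    xs.foldl pvStepA st = st.dropLast ++ pvConsFirst st.getLast! (convert_to_int_and_split_around_empty_alt xs) := by
  induction xs with
  | nil =>
    intro st hst
    simp only [convert_to_int_and_split_around_empty_alt, pvConsFirst, List.foldl_nil,
      List.append_nil]
    rw [pv_dropLast_getLast_cons st hst []]
    simp
  | cons x rest ih =>
    intro st hst
    simp only [List.foldl_cons, pvStepA]
    by_cases hx : PySem.Str.strip x = ""
    · rw [if_pos hx, ih (st ++ [[]]) (by simp)]
      simp only [convert_to_int_and_split_around_empty_alt]
      rw [if_pos hx]
      cases hT : convert_to_int_and_split_around_empty_alt rest with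
      | nil => exact absurd hT (alt_ne_nil rest)
      | cons g gs =>
        simp only [List.getLast!_eq_getLast?_getD, List.getLast?_concat,
          Option.getD_some, List.dropLast_concat, pvConsFirst, List.nil_append,
          List.append_nil]
        rw [← List.getLast!_eq_getLast?_getD, pv_dropLast_getLast_cons st hst (g :: gs)]
    · rw [if_neg hx, ih (st.dropLast ++ [st.getLast! ++ [pvParse x]]) (by simp)]
      simp only [convert_to_int_and_split_around_empty_alt]
      rw [if_neg hx]
      cases hT : convert_to_int_and_split_around_empty_alt rest with
      | nil => exact absurd hT (alt_ne_nil rest)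
      | cons g gs =>
        simp [pvConsFirst]

-- ===== VERDICT (by name: the statement is the Claim_ definition above) =====
theorem convert_to_int_and_split_around_empty_spec : Claim_equal_convert_to_int_and_split_around_empty := by
  intro xs _ _
  show convert_to_int_and_split_around_empty xs = convert_to_int_and_split_around_empty_alt xs
  rw [convert_to_int_and_split_around_empty, foldl_stepA xs [[]] (by simp)]
  cases hT : convert_to_int_and_split_around_empty_alt xs with
  | nil => exact absurd hT (alt_ne_nil xs)
  | cons g gs => simp [pvConsFirst]
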